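-- pv_equiv track=rewrite | github.com/Sorosliu1029/The_Fundamentals_of_Computing | AT/project_alignment_of_sequence.py | build_scoring_matrix
-- ===== SOURCE A (Python) =====
-- def build_scoring_matrix(alphabet, diag_score, off_diag_score, dash_score):
--     """
--     return a scoring matrix depending on the input score and alphabet set
--     """
--     alp = set(alphabet)
--     alp.add('-')
--     result = dict()
--     for char_a in alp:
--         row_result = dict()
--         for char_b in alp:
--             if char_a == '-' or char_b == '-':
--                 row_result[char_b] = dash_score
--             elif char_a == char_b:
--                 row_result[char_b] = diag_score
--             else:
--                 row_result[char_b] = off_diag_score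
--         result[char_a] = row_result
--     return result
-- ===== SOURCE B (Python) =====
-- def build_scoring_matrix(alphabet, diag_score, off_diag_score, dash_score):
--     """
--     Grow the matrix incrementally (bordering): for each new symbol, first
--     append its column to every existing row, then append its full row.
--     No full nested pass over the final alphabet ever happens.
--     """
--     alp = set(alphabet)
--     alp.add('-')
--
--     def cell(a, b):
--         if a == '-' or b == '-':
--             return dash_score
--         return diag_score if a == b else off_diag_score
--
--     result = {}
--     for c in alp:
--         for a in result:
--             result[a][c] = cell(a, c)
--         result[c] = {b: cell(c, b) for b in result}
--         result[c][c] = cell(c, c)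
--     return result
-- ===== Notes on version B (the rewrite author's own statement) =====
-- stated objective: alternative
-- what changed: Replaces A's full nested double loop over the finished alphabet by an incremental bordering construction: the matrix grows one symbol at a time, each new symbol appending its column to every existing row and then its own row, with the score computed by a shared cell helper.
import Mathlib
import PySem

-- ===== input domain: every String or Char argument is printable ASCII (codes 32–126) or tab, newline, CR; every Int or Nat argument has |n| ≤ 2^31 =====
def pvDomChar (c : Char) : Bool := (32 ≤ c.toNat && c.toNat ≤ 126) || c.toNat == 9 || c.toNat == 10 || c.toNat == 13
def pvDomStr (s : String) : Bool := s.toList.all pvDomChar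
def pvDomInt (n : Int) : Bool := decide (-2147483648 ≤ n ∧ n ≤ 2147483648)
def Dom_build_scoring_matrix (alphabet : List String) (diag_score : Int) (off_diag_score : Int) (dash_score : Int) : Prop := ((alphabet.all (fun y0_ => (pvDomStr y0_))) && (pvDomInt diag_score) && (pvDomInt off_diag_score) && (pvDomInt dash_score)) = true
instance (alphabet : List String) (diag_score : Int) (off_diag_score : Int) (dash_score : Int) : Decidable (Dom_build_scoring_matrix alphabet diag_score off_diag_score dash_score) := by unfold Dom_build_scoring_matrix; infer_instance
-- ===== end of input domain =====

-- B replaces A's full nested double loop over the finished alphabet by an incremental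
-- bordering construction: the matrix grows one symbol at a time, each new symbol first
-- appending its column to every existing row and then its own full row
-- (objective: alternative algorithm, same asymptotic cost).
-- Both programs return a dict of dicts; both ports iterate the set in its deterministic
-- first-occurrence order.

-- ===== PORT A =====
def build_scoring_matrix (alphabet : List String) (diag_score : Int) (off_diag_score : Int) (dash_score : Int) : List (String × List (String × Int)) :=
  let alp : PySem.Set String := (PySem.Set.ofList alphabet).add "-"
  let result : PySem.Dict String (PySem.Dict String Int) :=
    alp.foldl (fun result char_a =>
      let row_result : PySem.Dict String Int :=
        alp.foldl (fun row_result char_b =>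
          if char_a = "-" ∨ char_b = "-" then row_result.insert char_b dash_score
          else if char_a = char_b then row_result.insert char_b diag_score
          else row_result.insert char_b off_diag_score) PySem.Dict.empty
      result.insert char_a row_result) PySem.Dict.empty
  result.items.map (fun p => (p.1, p.2.items))

-- ===== PORT B =====
-- port of Source B's closure `cell(a, b)`
def bsmCell (a b : String) (diag off dash : Int) : Int :=
  if a = "-" ∨ b = "-" then dash else if a = b then diag else off

-- result[a][c] = v  is ported as  r.insert a ((r.getD a empty).insert c v);
-- exact here since the mutation loop runs over r's own keys (the default is never consulted).
def build_scoring_matrix_alt (alphabet : List String) (diag_score : Int) (off_diag_score : Int) (dash_score : Int) : List (String × List (String × Int)) :=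
  let alp : PySem.Set String := (PySem.Set.ofList alphabet).add "-"
  let result : PySem.Dict String (PySem.Dict String Int) :=
    alp.foldl (fun result c =>
      -- for a in result: result[a][c] = cell(a, c)
      let result := result.keys.foldl
        (fun r a => r.insert a ((r.getD a PySem.Dict.empty).insert c (bsmCell a c diag_score off_diag_score dash_score))) result
      -- result[c] = {b: cell(c, b) for b in result}
      let row := result.keys.foldl
        (fun row b => row.insert b (bsmCell c b diag_score off_diag_score dash_score)) PySem.Dict.empty
      -- result[c][c] = cell(c, c)
      result.insert c (row.insert c (bsmCell c c diag_score off_diag_score dash_score))) PySem.Dict.empty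
  result.items.map (fun p => (p.1, p.2.items))

-- ===== PRECONDITION & SPEC =====
def Spec_build_scoring_matrix (alphabet : List String) (diag_score : Int) (off_diag_score : Int) (dash_score : Int) (out : List (String × List (String × Int))) : Prop := out = build_scoring_matrix_alt alphabet diag_score off_diag_score dash_score
instance (alphabet : List String) (diag_score : Int) (off_diag_score : Int) (dash_score : Int) (out : List (String × List (String × Int))) : Decidable (Spec_build_scoring_matrix alphabet diag_score off_diag_score dash_score out) := by unfold Spec_build_scoring_matrix; infer_instance

-- ===== CLAIM (what is proved, stated in full; the proofs are below) =====
def Claim_equal_build_scoring_matrix : Prop := ∀ (alphabet : List String) (diag_score : Int) (off_diag_score : Int) (dash_score : Int), Dom_build_scoring_matrix alphabet diag_score off_diag_score dash_score → Spec_build_scoring_matrix alphabet diag_score off_diag_score dash_score (build_scoring_matrix alphabet diag_score off_diag_score dash_score)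

-- ===== LEMMAS AND PROOFS =====

theorem bsm_dict_eq_of_items_eq {κ ν : Type} {d e : PySem.Dict κ ν} (h : d.items = e.items) : d = e := by
  cases d; cases e; cases h; rfl

theorem bsm_fold_fresh_items {ν : Type} (l : List String) (f : String → ν) (h : l.Nodup) :
    (l.foldl (fun r b => r.insert b (f b)) PySem.Dict.empty).items = l.map (fun b => (b, f b)) := by
  have := PySem.Dict.items_foldl_insert_fresh l (fun b => b) f PySem.Dict.empty
    (by intro a _; simp [PySem.Dict.contains_empty]) (by simpa using h)
  simpa using this

theorem bsm_items_foldl_update {ν : Type} (l : List String) (d : PySem.Dict String ν)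
    (g : ν → String → ν) (dflt : ν) (hl : l.Nodup) (hk : d.keys.Nodup)
    (hsub : ∀ c ∈ l, c ∈ d.keys) :
    (l.foldl (fun d c => d.insert c (g (d.getD c dflt) c)) d).items
      = d.items.map (fun p => if p.1 ∈ l then (p.1, g p.2 p.1) else p) := by
  induction l generalizing d with
  | nil => simp
  | cons c l ih =>
    simp only [List.foldl_cons]
    have hc : c ∈ d.keys := hsub c (by simp)
    have hcont : d.contains c = true := by
      rw [PySem.Dict.contains_eq_decide_mem_keys]; simpa
    have hkeys : (d.insert c (g (d.getD c dflt) c)).keys = d.keys :=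
      PySem.Dict.keys_insert_of_contains d _ hcont
    rw [ih _ (List.nodup_cons.mp hl).2 (by rw [hkeys]; exact hk)
        (fun x hx => by rw [hkeys]; exact hsub x (List.mem_cons_of_mem _ hx))]
    rw [PySem.Dict.items_insert_of_contains d _ hcont, List.map_map]
    refine List.map_congr_left ?_
    intro p hp
    simp only [Function.comp]
    by_cases h1 : p.1 = c
    · have hcl : c ∉ l := (List.nodup_cons.mp hl).1
      have hpd : d.getD c dflt = p.2 := by
        have : (c, p.2) ∈ d.items := by
          have : p = (c, p.2) := by cases p; simp_all
          rw [← this]; exact hp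
        exact PySem.Dict.getD_of_mem_items d this hk dflt
      simp [h1, hpd, hcl]
    · simp [h1, beq_iff_eq]

theorem bsm_A_canon (alp : List String) (h : alp.Nodup) (diag off dash : Int) :
    ((alp.foldl (fun result char_a =>
        result.insert char_a
          (alp.foldl (fun row_result char_b =>
            if char_a = "-" ∨ char_b = "-" then row_result.insert char_b dash
            else if char_a = char_b then row_result.insert char_b diag
            else row_result.insert char_b off) PySem.Dict.empty))
        PySem.Dict.empty).items).map (fun p => (p.1, p.2.items))
      = alp.map (fun a => (a, alp.map (fun b => (b, bsmCell a b diag off dash)))) := by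
  have hrow : ∀ a : String,
      (alp.foldl (fun row_result char_b =>
        if a = "-" ∨ char_b = "-" then row_result.insert char_b dash
        else if a = char_b then row_result.insert char_b diag
        else row_result.insert char_b off) PySem.Dict.empty).items
      = alp.map (fun b => (b, bsmCell a b diag off dash)) := by
    intro a
    have hfun : (fun (r : PySem.Dict String Int) b =>
        if a = "-" ∨ b = "-" then r.insert b dash
        else if a = b then r.insert b diag
        else r.insert b off)
        = fun r b => r.insert b (bsmCell a b diag off dash) := by
      funext r b; simp only [bsmCell]; split_ifs <;> rfl
    rw [hfun, bsm_fold_fresh_items alp _ h]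
  rw [bsm_fold_fresh_items alp _ h, List.map_map]
  refine List.map_congr_left ?_
  intro a _
  simp only [Function.comp]
  rw [hrow a]

-- the bordering invariant: after folding B's step over a duplicate-free list l,
-- the accumulator is exactly the scoring matrix over l.
theorem bsm_B_inv (l : List String) (h : l.Nodup) (diag off dash : Int) :
    l.foldl (fun result c =>
      let result := result.keys.foldl
        (fun r a => r.insert a ((r.getD a PySem.Dict.empty).insert c (bsmCell a c diag off dash))) result
      let row := result.keys.foldl
        (fun row b => row.insert b (bsmCell c b diag off dash)) PySem.Dict.empty
      result.insert c (row.insert c (bsmCell c c diag off dash))) PySem.Dict.empty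
    = PySem.Dict.mk (l.map (fun a =>
        (a, PySem.Dict.mk (l.map (fun b => (b, bsmCell a b diag off dash)))))) := by
  induction l using List.reverseRecOn with
  | nil => rfl
  | append_singleton l c ih =>
    have hl : l.Nodup := (List.nodup_append.mp h).1
    have hcl : c ∉ l := fun hc => (List.nodup_append.mp h).2.2 c hc c (by simp) rfl
    rw [List.foldl_append, ih hl]
    simp only [List.foldl_cons, List.foldl_nil]
    set N : PySem.Dict String (PySem.Dict String Int) :=
      PySem.Dict.mk (l.map (fun a =>
        (a, PySem.Dict.mk (l.map (fun b => (b, bsmCell a b diag off dash)))))) with hN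
    have hNitems : N.items = l.map (fun a =>
        (a, PySem.Dict.mk (l.map (fun b => (b, bsmCell a b diag off dash))))) := rfl
    have hNkeys : N.keys = l := by
      show N.items.map Prod.fst = l
      rw [hNitems, List.map_map]; simp [Function.comp_def]
    -- phase 1: append column c to every existing row
    set r1 : PySem.Dict String (PySem.Dict String Int) :=
      N.keys.foldl (fun r a => r.insert a ((r.getD a PySem.Dict.empty).insert c
        (bsmCell a c diag off dash))) N with hr1
    have hr1eq : r1 = PySem.Dict.mk (l.map (fun a =>
        (a, PySem.Dict.mk ((l ++ [c]).map (fun b => (b, bsmCell a b diag off dash)))))) := by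
      apply bsm_dict_eq_of_items_eq
      have hupd := bsm_items_foldl_update N.keys N
        (fun row a => row.insert c (bsmCell a c diag off dash)) PySem.Dict.empty
        (by rw [hNkeys]; exact hl) (by rw [hNkeys]; exact hl) (fun x hx => hx)
      rw [hr1, hupd, hNitems, List.map_map]
      refine List.map_congr_left ?_
      intro a ha
      have hmem : a ∈ N.keys := by rw [hNkeys]; exact ha
      simp only [Function.comp]
      rw [if_pos hmem]
      refine congrArg (Prod.mk a) ?_
      apply bsm_dict_eq_of_items_eq
      have hrcont : (PySem.Dict.mk (l.map (fun b => (b, bsmCell a b diag off dash)))).contains c = false := by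
        rw [PySem.Dict.contains_eq_decide_mem_keys]
        have hk2 : (PySem.Dict.mk (l.map (fun b => (b, bsmCell a b diag off dash)))).keys = l := by
          show (l.map (fun b => (b, bsmCell a b diag off dash))).map Prod.fst = l
          rw [List.map_map]; simp [Function.comp_def]
        rw [hk2]; simpa using hcl
      rw [PySem.Dict.items_insert_of_not_contains _ _ hrcont]
      rw [List.map_append]
      rfl
    have hr1keys : r1.keys = l := by
      rw [hr1eq]
      show (l.map (fun a =>
        (a, PySem.Dict.mk ((l ++ [c]).map (fun b => (b, bsmCell a b diag off dash)))))).map Prod.fst = l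
      rw [List.map_map]; simp [Function.comp_def]
    -- phase 2: c's own row over r1's keys, then its diagonal cell
    have hrow0 : (r1.keys.foldl (fun row b => row.insert b (bsmCell c b diag off dash))
        PySem.Dict.empty).items = l.map (fun b => (b, bsmCell c b diag off dash)) := by
      rw [hr1keys]; exact bsm_fold_fresh_items l _ hl
    have hrowc : ((r1.keys.foldl (fun row b => row.insert b (bsmCell c b diag off dash))
        PySem.Dict.empty).insert c (bsmCell c c diag off dash))
        = PySem.Dict.mk ((l ++ [c]).map (fun b => (b, bsmCell c b diag off dash))) := by
      apply bsm_dict_eq_of_items_eq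
      have hcont : (r1.keys.foldl (fun row b => row.insert b (bsmCell c b diag off dash))
          PySem.Dict.empty).contains c = false := by
        rw [PySem.Dict.contains_eq_decide_mem_keys]
        have hk : (r1.keys.foldl (fun row b => row.insert b (bsmCell c b diag off dash))
            PySem.Dict.empty).keys = l := by
          show (r1.keys.foldl (fun row b => row.insert b (bsmCell c b diag off dash))
            PySem.Dict.empty).items.map Prod.fst = l
          rw [hrow0, List.map_map]; simp [Function.comp_def]
        rw [hk]; simpa using hcl
      rw [PySem.Dict.items_insert_of_not_contains _ _ hcont, hrow0]
      rw [List.map_append]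
      rfl
    -- phase 3: append row c
    have hcontc : r1.contains c = false := by
      rw [PySem.Dict.contains_eq_decide_mem_keys, hr1keys]; simpa using hcl
    apply bsm_dict_eq_of_items_eq
    rw [PySem.Dict.items_insert_of_not_contains _ _ hcontc, hrowc, hr1eq]
    conv_rhs => rw [List.map_append]
    rfl

theorem bsm_B_canon (alp : List String) (h : alp.Nodup) (diag off dash : Int) :
    ((alp.foldl (fun result c =>
      let result := result.keys.foldl
        (fun r a => r.insert a ((r.getD a PySem.Dict.empty).insert c (bsmCell a c diag off dash))) result
      let row := result.keys.foldl
        (fun row b => row.insert b (bsmCell c b diag off dash)) PySem.Dict.empty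
      result.insert c (row.insert c (bsmCell c c diag off dash))) PySem.Dict.empty).items).map
        (fun p => (p.1, p.2.items))
      = alp.map (fun a => (a, alp.map (fun b => (b, bsmCell a b diag off dash)))) := by
  rw [bsm_B_inv alp h diag off dash]
  show (alp.map _).map _ = _
  rw [List.map_map]
  refine List.map_congr_left ?_
  intro a _; rfl

-- ===== VERDICT (by name: the statement is the Claim_ definition above) =====
theorem build_scoring_matrix_spec : Claim_equal_build_scoring_matrix := by
  intro alphabet diag off dash _
  unfold Spec_build_scoring_matrix build_scoring_matrix build_scoring_matrix_alt
  have hnd : ((PySem.Set.ofList alphabet).add "-").Nodup :=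
    PySem.Set.nodup_add _ _ (PySem.Set.nodup_ofList alphabet)
  rw [bsm_A_canon _ hnd, bsm_B_canon _ hnd]
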